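-- pv_equiv track=rewrite | github.com/dunkdunkdunk/ComProg1 | 09_MoreDC_33.py | pattern2
-- ===== SOURCE A (Python) =====
-- def pattern2(nrows,ncols):
--     ans,last=[],0
--     for i in range(nrows):
--         k=[]
--         for j in range(last+1,(ncols*nrows)+1,nrows):
--             k.append(j)
--         last+=1
--         ans.append(k)
--     return ans
-- ===== SOURCE B (Python) =====
-- def pattern2(nrows, ncols):
--     # Column-major fill: keep a running counter and append to every row once per column,
--     # instead of computing each row as an arithmetic progression.
--     if nrows <= 0:
--         return []
--     ans = [[] for _ in range(nrows)]
--     n = 1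
--     for _ in range(ncols):
--         for row in ans:
--             row.append(n)
--             n += 1
--     return ans
-- ===== Notes on version B (the rewrite author's own statement) =====
-- stated objective: alternative
-- what changed: B pre-initializes one empty list per row and fills the grid column-major with a single running counter (appending to each row once per column), instead of A's row-major loop that builds each row as an arithmetic-progression range with start last+1 and step nrows.
import Mathlib
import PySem

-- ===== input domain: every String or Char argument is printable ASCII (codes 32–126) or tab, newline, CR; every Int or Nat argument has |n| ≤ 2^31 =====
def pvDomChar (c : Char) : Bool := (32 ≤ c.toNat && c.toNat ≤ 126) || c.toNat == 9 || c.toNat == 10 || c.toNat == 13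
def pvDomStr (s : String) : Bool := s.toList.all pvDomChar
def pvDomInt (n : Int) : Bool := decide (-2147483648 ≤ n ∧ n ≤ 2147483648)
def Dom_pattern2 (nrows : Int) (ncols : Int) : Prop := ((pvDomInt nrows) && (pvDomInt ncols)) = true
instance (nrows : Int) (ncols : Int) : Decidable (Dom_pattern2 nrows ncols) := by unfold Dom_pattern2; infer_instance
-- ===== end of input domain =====

-- B fills the grid column-major with a single running counter (one appended value per row per
-- column) instead of A's per-row arithmetic-progression ranges; objective: alternative decomposition.

-- ===== PORT A =====
-- ans,last=[],0; for i in range(nrows): k=[j for j in range(last+1, ncols*nrows+1, nrows)]; last+=1; ans.append(k)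
def pattern2 (nrows : Int) (ncols : Int) : List (List Int) :=
  ((PySem.List.pyRange 0 nrows 1).foldl
    (fun (st : List (List Int) × Int) _i =>
      let k := PySem.List.pyRange (st.2 + 1) (ncols * nrows + 1) nrows
      (st.1 ++ [k], st.2 + 1))
    ([], 0)).1

-- ===== PORT B =====
-- ans=[[] for _ in range(nrows)]; n=1; for _ in range(ncols): (for row in ans: row.append(n); n+=1)
def pattern2_alt (nrows : Int) (ncols : Int) : List (List Int) :=
  if nrows ≤ 0 then []
  else
  ((PySem.List.pyRange 0 ncols 1).foldl
    (fun (st : List (List Int) × Int) _j =>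
      st.1.foldl (fun (st2 : List (List Int) × Int) row => (st2.1 ++ [row ++ [st2.2]], st2.2 + 1))
        ([], st.2))
    ((PySem.List.pyRange 0 nrows 1).map (fun _ => []), 1)).1

-- ===== PRECONDITION & SPEC =====
def Spec_pattern2 (nrows : Int) (ncols : Int) (out : List (List Int)) : Prop := out = pattern2_alt nrows ncols
instance (nrows : Int) (ncols : Int) (out : List (List Int)) : Decidable (Spec_pattern2 nrows ncols out) := by unfold Spec_pattern2; infer_instance

-- ===== CLAIM (what is proved, stated in full; the proofs are below) =====
def Claim_equal_pattern2 : Prop := ∀ (nrows : Int) (ncols : Int), Dom_pattern2 nrows ncols → Spec_pattern2 nrows ncols (pattern2 nrows ncols)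

-- ===== LEMMAS AND PROOFS =====

-- the common normal form: row i of the grid is i+1, i+1+nrows, …, with ncols entries
def gRow (nrows : Int) (c : Nat) (i : Nat) : List Int :=
  (List.range c).map (fun (j : Nat) => (i : Int) + 1 + nrows * (j : Int))

def gGrid (nrows : Int) (R c : Nat) : List (List Int) :=
  (List.range R).map (gRow nrows c)

-- a fold whose step ignores the element is an iterate
theorem foldl_ignore {α β : Type} (F : β → β) :
    ∀ (l : List α) (init : β), l.foldl (fun st _ => F st) init = F^[l.length] init := by
  intro l
  induction l with
  | nil => intro init; rfl
  | cons x xs ih =>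
      intro init
      simp [List.foldl, ih, Function.iterate_succ_apply]

-- A's loop state after m iterations
theorem iterA (nrows ncols : Int) : ∀ (m : Nat),
    (fun (st : List (List Int) × Int) =>
        (st.1 ++ [PySem.List.pyRange (st.2 + 1) (ncols * nrows + 1) nrows], st.2 + 1))^[m]
      (([] : List (List Int)), (0 : Int))
    = ((List.range m).map (fun (k : Nat) => PySem.List.pyRange ((k : Int) + 1) (ncols * nrows + 1) nrows),
       (m : Int)) := by
  intro m
  induction m with
  | zero => simp
  | succ m ih =>
      rw [Function.iterate_succ_apply', ih]
      simp [List.range_succ]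

-- the arithmetic-progression row, rewritten as a range of length ncols
theorem rowA (nrows ncols : Int) (k : Nat) (hk : k < nrows.toNat) :
    PySem.List.pyRange ((k : Int) + 1) (ncols * nrows + 1) nrows = gRow nrows ncols.toNat k := by
  have hpos : 0 < nrows := by omega
  rw [PySem.List.pyRange_of_pos _ _ hpos]
  have hcnt : (if ((k : Int) + 1) < ncols * nrows + 1
      then ((ncols * nrows + 1 - ((k : Int) + 1) + nrows - 1) / nrows).toNat else 0)
      = ncols.toNat := by
    by_cases hc : 0 < ncols
    · have hkn : (k : Int) < nrows := by omega
      have hlt : (k : Int) < ncols * nrows := by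
        calc (k : Int) < nrows := hkn
          _ = 1 * nrows := by ring
          _ ≤ ncols * nrows := by
              apply mul_le_mul_of_nonneg_right (by omega) (le_of_lt hpos)
      rw [if_pos (by omega)]
      have hnum : ncols * nrows + 1 - ((k : Int) + 1) + nrows - 1
          = (nrows - 1 - (k : Int)) + ncols * nrows := by ring
      rw [hnum, Int.add_mul_ediv_right _ _ (by omega : nrows ≠ 0),
          Int.ediv_eq_zero_of_lt (by omega) (by omega)]
      simp
    · have hle : ncols * nrows ≤ 0 := mul_nonpos_of_nonpos_of_nonneg (by omega) (le_of_lt hpos)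
      rw [if_neg (by omega)]
      omega
  rw [hcnt]
  unfold gRow
  apply List.map_congr_left
  intro j _
  ring

theorem A_norm (nrows ncols : Int) :
    pattern2 nrows ncols = gGrid nrows nrows.toNat ncols.toNat := by
  unfold pattern2
  rw [foldl_ignore
      (fun (st : List (List Int) × Int) =>
        (st.1 ++ [PySem.List.pyRange (st.2 + 1) (ncols * nrows + 1) nrows], st.2 + 1)),
      PySem.List.length_pyRange_one, iterA]
  simp only [Int.sub_zero]
  unfold gGrid
  apply List.map_congr_left
  intro k hk
  exact rowA nrows ncols k (List.mem_range.mp hk)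

-- enumerating a mapped range
theorem enum_map_range (f : Nat → List Int) :
    ∀ (R : Nat) (s : Int),
      PySem.List.enumerate ((List.range R).map f) s
        = (List.range R).map (fun (k : Nat) => (s + (k : Int), f k)) := by
  intro R
  induction R with
  | zero => intro s; simp [PySem.List.enumerate_nil]
  | succ R ih =>
      intro s
      rw [List.range_succ]
      simp only [List.map_append, List.map_cons, List.map_nil]
      rw [PySem.List.enumerate_append, ih,
          PySem.List.enumerate_cons, PySem.List.enumerate_nil]
      simp

-- the inner pass: appending the counter to every row in order
theorem innerFold : ∀ (xs acc : List (List Int)) (n : Int),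
    xs.foldl (fun (st2 : List (List Int) × Int) row => (st2.1 ++ [row ++ [st2.2]], st2.2 + 1)) (acc, n)
      = (acc ++ (PySem.List.enumerate xs n).map (fun p => p.2 ++ [p.1]), n + xs.length) := by
  intro xs
  induction xs with
  | nil => intro acc n; simp [PySem.List.enumerate_nil]
  | cons x xs ih =>
      intro acc n
      simp only [List.foldl_cons, ih, PySem.List.enumerate_cons, List.map_cons]
      simp only [Prod.mk.injEq]
      constructor
      · simp
      · simp only [List.length_cons]; push_cast; ring

-- B's loop state after c columns
theorem iterB (nrows : Int) : ∀ (c : Nat),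
    (fun (st : List (List Int) × Int) =>
        st.1.foldl (fun (st2 : List (List Int) × Int) row => (st2.1 ++ [row ++ [st2.2]], st2.2 + 1))
          ([], st.2))^[c]
      (gGrid nrows nrows.toNat 0, 1)
    = (gGrid nrows nrows.toNat c, 1 + (nrows.toNat : Int) * c) := by
  intro c
  induction c with
  | zero => simp
  | succ c ih =>
      rw [Function.iterate_succ_apply', ih]
      simp only
      unfold gGrid
      rw [innerFold, enum_map_range]
      simp only [Prod.mk.injEq, List.nil_append, List.map_map, List.length_map,
        List.length_range]
      constructor
      · apply List.map_congr_left
        intro k hk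
        have hk' : k < nrows.toNat := List.mem_range.mp hk
        have hn : ((nrows.toNat : Int)) = nrows := by omega
        simp only [Function.comp]
        unfold gRow
        rw [List.range_succ]
        simp [hn]
        ring
      · push_cast; ring

theorem B_norm (nrows ncols : Int) :
    pattern2_alt nrows ncols = gGrid nrows nrows.toNat ncols.toNat := by
  have h0 : (PySem.List.pyRange 0 nrows 1).map (fun _ => ([] : List Int))
      = gGrid nrows nrows.toNat 0 := by
    rw [PySem.List.pyRange_one]
    unfold gGrid gRow
    simp [List.map_map, Function.comp_def]
  simp only [pattern2_alt]
  by_cases hr : nrows ≤ 0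
  · rw [if_pos hr]
    unfold gGrid
    have : nrows.toNat = 0 := by omega
    simp [this]
  rw [if_neg hr]
  rw [h0,
      foldl_ignore
      (fun (st : List (List Int) × Int) =>
        st.1.foldl (fun (st2 : List (List Int) × Int) row => (st2.1 ++ [row ++ [st2.2]], st2.2 + 1))
          ([], st.2)),
      PySem.List.length_pyRange_one, iterB]
  simp

-- ===== VERDICT (by name: the statement is the Claim_ definition above) =====
theorem pattern2_spec : Claim_equal_pattern2 := by
  intro nrows ncols _
  unfold Spec_pattern2
  rw [A_norm, B_norm]
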